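-- pv_equiv track=rewrite | github.com/hexafe/metroliza | modules/csv_summary_utils.py | estimate_enabled_chart_count
-- ===== SOURCE A (Python) =====
-- def build_default_plot_toggles(data_columns, full_report=True):
--     """Build per-column plot toggles for CSV Summary export."""
--     return {
--         column: {
--             'histogram': bool(full_report),
--             'boxplot': bool(full_report),
--         }
--         for column in (data_columns or [])
--     }
--
-- def estimate_enabled_chart_count(data_columns, plot_toggles, full_report=True, summary_only=False):
--     """Estimate how many charts will be generated for a CSV Summary export."""
--     if summary_only or not full_report:
--         return 0
--
--     toggles = normalize_plot_toggles(data_columns, plot_toggles, full_report=True)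
--     return sum(
--         int(column_toggles.get('histogram', False)) + int(column_toggles.get('boxplot', False))
--         for column_toggles in toggles.values()
--     )
--
-- def normalize_plot_toggles(data_columns, plot_toggles, full_report=True):
--     """Ensure each selected column has a complete toggle payload."""
--     normalized = build_default_plot_toggles(data_columns, full_report=full_report)
--     plot_toggles = plot_toggles or {}
--
--     for column in normalized:
--         column_payload = plot_toggles.get(column, {})
--         if isinstance(column_payload, dict):
--             normalized[column]['histogram'] = bool(column_payload.get('histogram', normalized[column]['histogram']))
--             normalized[column]['boxplot'] = bool(column_payload.get('boxplot', normalized[column]['boxplot']))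
--
--     return normalized
-- ===== SOURCE B (Python) =====
-- def estimate_enabled_chart_count(data_columns, plot_toggles, full_report=True, summary_only=False):
--     """Estimate how many charts will be generated for a CSV Summary export."""
--     if summary_only or not full_report:
--         return 0
--     toggles = plot_toggles or {}
--     total = 0
--     for column in dict.fromkeys(data_columns or []):
--         payload = toggles.get(column, {})
--         if isinstance(payload, dict):
--             total += int(bool(payload.get('histogram', True))) + int(bool(payload.get('boxplot', True)))
--         else:
--             total += 2
--     return total
-- ===== Notes on version B (the rewrite author's own statement) =====
-- stated objective: simpler
-- what changed: B replaces A's three-stage pipeline (build a per-column default toggle dict, normalize it in a second pass against plot_toggles, then sum over the dict's values) with a single fused pass over the deduplicated columns that looks up each column's payload directly and accumulates the two enabled flags, never materialising the normalized dict.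
import Mathlib
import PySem

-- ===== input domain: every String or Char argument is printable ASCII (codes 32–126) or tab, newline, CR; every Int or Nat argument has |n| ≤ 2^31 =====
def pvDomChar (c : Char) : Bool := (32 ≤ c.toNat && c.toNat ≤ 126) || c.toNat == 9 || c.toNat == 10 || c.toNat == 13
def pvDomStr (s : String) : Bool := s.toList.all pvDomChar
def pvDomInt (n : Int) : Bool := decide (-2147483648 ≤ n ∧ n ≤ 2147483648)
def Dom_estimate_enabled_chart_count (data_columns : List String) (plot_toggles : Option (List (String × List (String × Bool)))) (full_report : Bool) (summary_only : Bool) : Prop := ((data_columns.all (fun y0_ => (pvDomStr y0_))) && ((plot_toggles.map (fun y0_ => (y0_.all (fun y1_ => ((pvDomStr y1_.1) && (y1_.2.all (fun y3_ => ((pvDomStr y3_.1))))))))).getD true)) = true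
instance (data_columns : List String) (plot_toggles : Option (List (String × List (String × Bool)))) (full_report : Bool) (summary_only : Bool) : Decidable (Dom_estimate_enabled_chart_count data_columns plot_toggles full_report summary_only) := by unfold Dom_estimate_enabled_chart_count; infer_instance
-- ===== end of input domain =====

-- B replaces A's build-defaults / normalize-dict / sum-over-values pipeline by one fused pass
-- over the deduplicated columns that never materialises the normalized dict (objective: simpler).

-- ===== PORT A =====
-- literal port of build_default_plot_toggles
def build_default_plot_toggles (data_columns : List String) (full_report : Bool) :
    PySem.Dict String (PySem.Dict String Bool) :=
  data_columns.foldl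
    (fun d column => d.insert column
      ((PySem.Dict.empty.insert "histogram" full_report).insert "boxplot" full_report))
    PySem.Dict.empty

-- one iteration of normalize_plot_toggles' for-loop body (the two in-place field updates);
-- the `isinstance(column_payload, dict)` test is always true under the Lean typing of plot_toggles
def pvNormStep (pt : PySem.Dict String (PySem.Dict String Bool))
    (n : PySem.Dict String (PySem.Dict String Bool)) (column : String) :
    PySem.Dict String (PySem.Dict String Bool) :=
  let payload := pt.getD column PySem.Dict.empty
  let n1 := n.modify column PySem.Dict.empty
    (fun cur => cur.insert "histogram" (payload.getD "histogram" (cur.getD "histogram" false)))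
  n1.modify column PySem.Dict.empty
    (fun cur => cur.insert "boxplot" (payload.getD "boxplot" (cur.getD "boxplot" false)))

-- literal port of normalize_plot_toggles
def normalize_plot_toggles (data_columns : List String)
    (plot_toggles : Option (List (String × List (String × Bool)))) (full_report : Bool) :
    PySem.Dict String (PySem.Dict String Bool) :=
  let normalized := build_default_plot_toggles data_columns full_report
  let pt := PySem.Dict.mk ((plot_toggles.getD []).map (fun p => (p.1, PySem.Dict.mk p.2)))
  normalized.keys.foldl (pvNormStep pt) normalized

def estimate_enabled_chart_count (data_columns : List String) (plot_toggles : Option (List (String × List (String × Bool)))) (full_report : Bool) (summary_only : Bool) : Int :=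
  if summary_only || !full_report then 0
  else
    let toggles := normalize_plot_toggles data_columns plot_toggles true
    (toggles.values.map (fun column_toggles =>
      (if column_toggles.getD "histogram" false then (1 : Int) else 0) +
      (if column_toggles.getD "boxplot" false then (1 : Int) else 0))).sum

-- ===== PORT B =====
def estimate_enabled_chart_count_alt (data_columns : List String) (plot_toggles : Option (List (String × List (String × Bool)))) (full_report : Bool) (summary_only : Bool) : Int :=
  if summary_only || !full_report then 0
  else
    let toggles := PySem.Dict.mk ((plot_toggles.getD []).map (fun p => (p.1, PySem.Dict.mk p.2)))
    (PySem.List.dedup data_columns).foldl (fun total column =>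
      let payload := toggles.getD column PySem.Dict.empty
      total + ((if payload.getD "histogram" true then (1 : Int) else 0) +
               (if payload.getD "boxplot" true then (1 : Int) else 0))) 0

-- ===== PRECONDITION & SPEC =====
def Spec_estimate_enabled_chart_count (data_columns : List String) (plot_toggles : Option (List (String × List (String × Bool)))) (full_report : Bool) (summary_only : Bool) (out : Int) : Prop := out = estimate_enabled_chart_count_alt data_columns plot_toggles full_report summary_only
instance (data_columns : List String) (plot_toggles : Option (List (String × List (String × Bool)))) (full_report : Bool) (summary_only : Bool) (out : Int) : Decidable (Spec_estimate_enabled_chart_count data_columns plot_toggles full_report summary_only out) := by unfold Spec_estimate_enabled_chart_count; infer_instance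

-- ===== CLAIM (what is proved, stated in full; the proofs are below) =====
def Claim_equal_estimate_enabled_chart_count : Prop := ∀ (data_columns : List String) (plot_toggles : Option (List (String × List (String × Bool)))) (full_report : Bool) (summary_only : Bool), Dom_estimate_enabled_chart_count data_columns plot_toggles full_report summary_only → Spec_estimate_enabled_chart_count data_columns plot_toggles full_report summary_only (estimate_enabled_chart_count data_columns plot_toggles full_report summary_only)

-- ===== LEMMAS AND PROOFS =====

-- the net effect of one pvNormStep on its own column's payload
def pvG (pt : PySem.Dict String (PySem.Dict String Bool)) (column : String)
    (cur : PySem.Dict String Bool) : PySem.Dict String Bool :=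
  let payload := pt.getD column PySem.Dict.empty
  let cur1 := cur.insert "histogram" (payload.getD "histogram" (cur.getD "histogram" false))
  cur1.insert "boxplot" (payload.getD "boxplot" (cur1.getD "boxplot" false))

theorem foldl_insert_const_getD (l : List String) (v : PySem.Dict String Bool)
    (d : PySem.Dict String (PySem.Dict String Bool)) (c : String) :
    (l.foldl (fun d k => d.insert k v) d).getD c PySem.Dict.empty
      = if c ∈ l then v else d.getD c PySem.Dict.empty := by
  induction l generalizing d with
  | nil => simp
  | cons a l ih =>
    simp only [List.foldl_cons, ih, PySem.Dict.getD_insert, List.mem_cons]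
    by_cases h : c ∈ l <;> by_cases h' : c = a <;> simp [h, h']

theorem build_getD (dc : List String) (fr : Bool) (c : String) :
    (build_default_plot_toggles dc fr).getD c PySem.Dict.empty
      = if c ∈ dc then (PySem.Dict.empty.insert "histogram" fr).insert "boxplot" fr
        else PySem.Dict.empty := by
  simpa [build_default_plot_toggles] using
    foldl_insert_const_getD dc ((PySem.Dict.empty.insert "histogram" fr).insert "boxplot" fr)
      PySem.Dict.empty c

theorem build_keys (dc : List String) (fr : Bool) :
    (build_default_plot_toggles dc fr).keys = PySem.List.dedup dc := by
  simp [build_default_plot_toggles, PySem.Dict.keys_foldl_insert, PySem.Set.update,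
    PySem.Set.ofList_eq_foldl]

theorem normStep_getD_ne (pt n : PySem.Dict String (PySem.Dict String Bool))
    (k c : String) (h : c ≠ k) :
    (pvNormStep pt n k).getD c PySem.Dict.empty = n.getD c PySem.Dict.empty := by
  simp [pvNormStep, PySem.Dict.getD_modify, h]

theorem normStep_getD_self (pt n : PySem.Dict String (PySem.Dict String Bool)) (c : String) :
    (pvNormStep pt n c).getD c PySem.Dict.empty = pvG pt c (n.getD c PySem.Dict.empty) := by
  simp [pvNormStep, pvG, PySem.Dict.getD_modify_self]

theorem foldl_normStep_getD (pt : PySem.Dict String (PySem.Dict String Bool))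
    (ks : List String) (n : PySem.Dict String (PySem.Dict String Bool)) (c : String)
    (hnd : ks.Nodup) :
    (ks.foldl (pvNormStep pt) n).getD c PySem.Dict.empty
      = if c ∈ ks then pvG pt c (n.getD c PySem.Dict.empty) else n.getD c PySem.Dict.empty := by
  induction ks generalizing n with
  | nil => simp
  | cons a ks ih =>
    simp only [List.foldl_cons, List.mem_cons]
    rcases List.nodup_cons.mp hnd with ⟨ha, hnd'⟩
    by_cases h : c = a
    · subst h
      have hc : c ∉ ks := ha
      simp [ih _ hnd', hc, normStep_getD_self]
    · simp [ih _ hnd', normStep_getD_ne pt n a c h, h]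

theorem keys_insert_mem (d : PySem.Dict String (PySem.Dict String Bool))
    (k : String) (v : PySem.Dict String Bool) (h : k ∈ d.keys) :
    (d.insert k v).keys = d.keys := by
  have hfi := PySem.Dict.keys_foldl_insert [k] (fun _ _ => v) d
  simp only [List.foldl_cons, List.foldl_nil] at hfi
  rw [hfi]
  simp only [PySem.Set.update, List.foldl_cons, List.foldl_nil, PySem.Set.add, PySem.Set.contains]
  rw [if_pos]
  simpa [List.contains_eq_mem] using h

theorem keys_foldl_normStep (pt : PySem.Dict String (PySem.Dict String Bool))
    (ks : List String) (n : PySem.Dict String (PySem.Dict String Bool))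
    (hks : ∀ c ∈ ks, c ∈ n.keys) :
    (ks.foldl (pvNormStep pt) n).keys = n.keys := by
  induction ks generalizing n with
  | nil => simp
  | cons a ks ih =>
    have ha : a ∈ n.keys := hks a (by simp)
    have hkeys : (pvNormStep pt n a).keys = n.keys := by
      show (((n.modify a PySem.Dict.empty _).insert a _)).keys = n.keys
      rw [keys_insert_mem, PySem.Dict.keys_modify, keys_insert_mem _ _ _ ha]
      rw [PySem.Dict.keys_modify, keys_insert_mem _ _ _ ha]; exact ha
    simp only [List.foldl_cons]
    rw [ih _ (fun c hc => by rw [hkeys]; exact hks c (by simp [hc])), hkeys]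

-- ===== VERDICT (by name: the statement is the Claim_ definition above) =====
theorem estimate_enabled_chart_count_spec : Claim_equal_estimate_enabled_chart_count := by
  intro dc pt0 fr so _
  unfold Spec_estimate_enabled_chart_count
  unfold estimate_enabled_chart_count estimate_enabled_chart_count_alt
  by_cases hg : (so || !fr) = true
  · simp only [hg, if_true]
  · rw [if_neg hg, if_neg hg]
    simp only [normalize_plot_toggles]
    set pt := PySem.Dict.mk ((pt0.getD []).map (fun p => (p.1, PySem.Dict.mk p.2))) with hpt
    set n := (build_default_plot_toggles dc true).keys.foldl (pvNormStep pt)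
      (build_default_plot_toggles dc true) with hn
    have hkeys : n.keys = PySem.List.dedup dc := by
      rw [hn, keys_foldl_normStep _ _ _ (fun c hc => hc), build_keys]
    have hnd : n.keys.Nodup := by rw [hkeys]; exact PySem.List.nodup_dedup dc
    rw [PySem.Dict.values_eq_map_keys _ hnd PySem.Dict.empty, hkeys, List.map_map,
      PySem.List.foldl_add]
    simp only [Int.zero_add]
    refine congrArg List.sum ?_
    apply List.map_congr_left
    intro c hc
    have hcdc : c ∈ dc := (PySem.List.mem_dedup dc c).mp hc
    have hget : n.getD c PySem.Dict.empty
        = pvG pt c ((PySem.Dict.empty.insert "histogram" true).insert "boxplot" true) := by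
      rw [hn, build_keys, foldl_normStep_getD _ _ _ _ (PySem.List.nodup_dedup dc),
        if_pos hc, build_getD, if_pos hcdc]
    simp [Function.comp, hget, pvG, PySem.Dict.getD_insert]
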